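-- pv_equiv track=rewrite | github.com/juanjoseexpositogonzalez/aoc25 | day06/main.py | group_problems
-- ===== SOURCE A (Python) =====
-- from typing import List, Final
--
-- def is_separator(column: List[str]) -> bool:
--     """
--     Check if the column is a separator.
--
--     Args:
--         column: List of strings to check if it is a separator.
--     Returns:
--         True if the column is a separator, False otherwise.
--     """
--     return all(c == ' ' for c in column)
--
-- def group_problems(columns: List[List[str]]) -> List[List[List[str]]]:
--     """
--     Group the columns into problems.
--
--     Args:
--         columns: List of columns to group into problems.
--     Returns:
--         List of problems, where each problem is a list of columns.
--     """
--     problems = []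
--     current_problem = []
--     for column in columns:
--         if is_separator(column):
--             problems.append(current_problem)
--             current_problem = []
--         else:
--             current_problem.append(column)
--     if current_problem:
--         problems.append(current_problem)
--     return problems
-- ===== SOURCE B (Python) =====
-- from typing import List, Optional, Tuple
--
--
-- def is_separator(column: List[str]) -> bool:
--     return all(c == ' ' for c in column)
--
--
-- def _split_at_sep(columns: List[List[str]]) -> Tuple[List[List[str]], Optional[List[List[str]]]]:
--     """Return (prefix before the first separator column, remainder after it),
--     or (columns, None) if there is no separator column."""
--     for i, col in enumerate(columns):
--         if is_separator(col):
--             return columns[:i], columns[i + 1:]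
--     return columns, None
--
--
-- def group_problems(columns: List[List[str]]) -> List[List[List[str]]]:
--     problems = []
--     rest = columns
--     while rest:
--         pre, nxt = _split_at_sep(rest)
--         problems.append(pre)
--         if nxt is None:
--             return problems
--         rest = nxt
--     return problems
-- ===== Notes on version B (the rewrite author's own statement) =====
-- stated objective: alternative
-- what changed: A walks column by column, appending each non-separator column to a growing current group; B instead repeatedly finds the next separator and slices off the whole segment before it in one cut, appending segments rather than elements.
import Mathlib
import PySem

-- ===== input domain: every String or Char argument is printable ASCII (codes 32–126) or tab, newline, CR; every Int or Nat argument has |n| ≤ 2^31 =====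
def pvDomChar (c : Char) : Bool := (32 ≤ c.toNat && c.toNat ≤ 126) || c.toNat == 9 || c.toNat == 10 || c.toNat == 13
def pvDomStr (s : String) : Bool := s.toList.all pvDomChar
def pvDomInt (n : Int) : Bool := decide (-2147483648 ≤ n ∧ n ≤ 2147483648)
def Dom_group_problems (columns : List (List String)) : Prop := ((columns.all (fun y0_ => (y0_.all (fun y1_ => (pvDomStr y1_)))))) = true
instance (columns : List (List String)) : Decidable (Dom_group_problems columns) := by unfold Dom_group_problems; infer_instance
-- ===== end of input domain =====

-- B replaces A's element-by-element accumulator loop by a loop that cuts whole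
-- segments at each separator column (objective: alternative decomposition, same cost).

-- shared helper: Python's is_separator
def is_separator (column : List String) : Bool := column.all (fun c => c == " ")

-- ===== PORT A =====
def group_problems (columns : List (List String)) : List (List (List String)) :=
  let st := columns.foldl
    (fun (st : List (List (List String)) × List (List String)) column =>
      if is_separator column then (st.1 ++ [st.2], []) else (st.1, st.2 ++ [column]))
    ([], [])
  if st.2.isEmpty then st.1 else st.1 ++ [st.2]

-- ===== PORT B =====
-- B's helper _split_at_sep: prefix before the first separator and the remainder after it
def splitAtSep (cs : List (List String)) : List (List String) × Option (List (List String)) :=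
  match cs with
  | [] => ([], none)
  | c :: cs' =>
    if is_separator c then ([], some cs')
    else
      let r := splitAtSep cs'
      (c :: r.1, r.2)

theorem splitAtSep_some_length (cs p r) (h : splitAtSep cs = (p, some r)) :
    r.length < cs.length := by
  induction cs generalizing p with
  | nil => simp [splitAtSep] at h
  | cons c cs' ih =>
    by_cases hs : is_separator c
    · simp [splitAtSep, hs] at h
      obtain ⟨h1, h2⟩ := h
      subst h2; simp
    · cases hq : splitAtSep cs' with
      | mk p' o' =>
        simp [splitAtSep, hs, hq] at h
        cases o' with
        | none => simp at h
        | some r' =>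
          obtain ⟨h1, h2⟩ := h
          have := ih p' (by rw [hq, h2])
          simp; omega

-- B's while loop: repeatedly cut off the segment before the next separator
def gpLoop (problems : List (List (List String))) (rest : List (List String)) :
    List (List (List String)) :=
  match rest with
  | [] => problems
  | c :: cs =>
    match h : splitAtSep (c :: cs) with
    | (pre, none) => problems ++ [pre]
    | (pre, some nxt) => gpLoop (problems ++ [pre]) nxt
termination_by rest.length
decreasing_by
  have := splitAtSep_some_length (c :: cs) pre nxt h
  simpa using this

def group_problems_alt (columns : List (List String)) : List (List (List String)) :=
  gpLoop [] columns

-- ===== PRECONDITION & SPEC =====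
def Spec_group_problems (columns : List (List String)) (out : List (List (List String))) : Prop := out = group_problems_alt columns
instance (columns : List (List String)) (out : List (List (List String))) : Decidable (Spec_group_problems columns out) := by unfold Spec_group_problems; infer_instance

-- ===== CLAIM (what is proved, stated in full; the proofs are below) =====
def Claim_equal_group_problems : Prop := ∀ (columns : List (List String)), Dom_group_problems columns → Spec_group_problems columns (group_problems columns)

-- ===== LEMMAS AND PROOFS =====

-- A's loop step and its finalisation, named for the proofs
def stepA (st : List (List (List String)) × List (List String)) (column : List String) :
    List (List (List String)) × List (List String) :=
  if is_separator column then (st.1 ++ [st.2], []) else (st.1, st.2 ++ [column])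

def finishA (st : List (List (List String)) × List (List String)) :
    List (List (List String)) :=
  if st.2.isEmpty then st.1 else st.1 ++ [st.2]

theorem group_problems_eq_finishA (columns : List (List String)) :
    group_problems columns = finishA (columns.foldl stepA ([], [])) := rfl

-- A's loop, written as a recursion on the column list with the current problem as state
def gpAux (cur : List (List String)) (cs : List (List String)) : List (List (List String)) :=
  match cs with
  | [] => if cur.isEmpty then [] else [cur]
  | c :: cs' => if is_separator c then cur :: gpAux [] cs' else gpAux (cur ++ [c]) cs'

theorem foldA_eq_gpAux (cs : List (List String)) (P : List (List (List String)))
    (cur : List (List String)) :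
    finishA (cs.foldl stepA (P, cur)) = P ++ gpAux cur cs := by
  induction cs generalizing P cur with
  | nil =>
    simp only [List.foldl_nil, gpAux, finishA]
    by_cases h : cur.isEmpty
    · simp [List.isEmpty_iff.mp h]
    · simp [h]
  | cons c cs' ih =>
    by_cases hs : is_separator c
    · simp only [List.foldl_cons, stepA, hs, if_true, gpAux]
      rw [ih]
      simp
    · simp only [List.foldl_cons, stepA, hs, Bool.false_eq_true, if_false, gpAux]
      rw [ih]

theorem gpAux_splitAtSep (cs : List (List String)) (cur : List (List String)) :
    gpAux cur cs =
      (match splitAtSep cs with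
       | (p, none) => if (cur ++ p).isEmpty then [] else [cur ++ p]
       | (p, some r) => (cur ++ p) :: gpAux [] r) := by
  induction cs generalizing cur with
  | nil => simp [splitAtSep, gpAux]
  | cons c cs' ih =>
    by_cases hs : is_separator c
    · simp [splitAtSep, hs, gpAux]
    · simp only [splitAtSep, hs, Bool.false_eq_true, if_false, gpAux]
      rw [ih (cur ++ [c])]
      cases h : splitAtSep cs' with
      | mk p o =>
        cases o <;> simp

theorem splitAtSep_none_ne_nil (c : List String) (cs pre : List (List String))
    (h : splitAtSep (c :: cs) = (pre, none)) : pre ≠ [] := by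
  by_cases hs : is_separator c
  · simp [splitAtSep, hs] at h
  · cases hq : splitAtSep cs with
    | mk p o =>
      simp [splitAtSep, hs, hq] at h
      intro he
      rw [he] at h
      exact List.cons_ne_nil _ _ h.1

theorem gpLoop_eq (P : List (List (List String))) (rest : List (List String)) :
    gpLoop P rest = P ++ gpAux [] rest := by
  match rest with
  | [] => simp [gpLoop, gpAux]
  | c :: cs =>
    rw [gpLoop]
    split
    next pre h =>
      rw [gpAux_splitAtSep (c :: cs) [], h]
      have hpre := splitAtSep_none_ne_nil c cs pre h
      simp [hpre]
    next pre nxt h =>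
      have ih := gpLoop_eq (P ++ [pre]) nxt
      rw [gpAux_splitAtSep (c :: cs) [], h, ih]
      simp
termination_by rest.length
decreasing_by
  have := splitAtSep_some_length (c :: cs) _ _ (by assumption)
  simpa using this

-- ===== VERDICT (by name: the statement is the Claim_ definition above) =====
theorem group_problems_spec : Claim_equal_group_problems := by
  intro columns _
  unfold Spec_group_problems group_problems_alt
  rw [group_problems_eq_finishA, gpLoop_eq, foldA_eq_gpAux]
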